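-- pv_equiv track=rewrite | github.com/marty-trey/advanced_python | mtmp1.py | check_by_col
-- ===== SOURCE A (Python) =====
-- def check_by_col(board):
--     winner = False
--     c=0
--     while c<len(board[0]):
--         r=0
--         count=0
--         while r<len(board):
--             if board[r][c] == 'x':
--                 count += 1
--             if count >= 3:
--                 winner = True
--             r+=1
--         c+=1
--     return winner
-- ===== SOURCE B (Python) =====
-- def check_by_col(board):
--     counts = [0] * len(board[0])
--     for r in range(len(board)):
--         counts = [counts[c] + (1 if board[r][c] == 'x' else 0)
--                   for c in range(len(board[0]))]
--     return any(x >= 3 for x in counts)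
-- ===== Notes on version B (the rewrite author's own statement) =====
-- stated objective: alternative
-- what changed: B replaces A's column-outer double while-loop with a scalar count per column by a single row-major pass that maintains a per-column tally list (built by a list comprehension), followed by a final any(tally>=3) scan.
import Mathlib
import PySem

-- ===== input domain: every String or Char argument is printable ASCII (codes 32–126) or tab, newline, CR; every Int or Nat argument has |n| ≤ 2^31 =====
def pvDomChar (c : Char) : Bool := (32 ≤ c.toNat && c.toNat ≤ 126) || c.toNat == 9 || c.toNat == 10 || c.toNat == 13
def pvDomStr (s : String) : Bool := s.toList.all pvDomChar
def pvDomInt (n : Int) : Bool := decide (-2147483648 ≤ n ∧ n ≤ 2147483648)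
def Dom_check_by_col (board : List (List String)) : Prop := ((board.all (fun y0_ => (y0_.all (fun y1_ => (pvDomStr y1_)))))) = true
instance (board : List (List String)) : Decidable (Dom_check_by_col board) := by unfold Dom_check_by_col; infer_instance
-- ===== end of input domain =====

-- B replaces A's column-outer scan with scalar count by a single row-major pass maintaining a
-- per-column tally list plus a final any() scan (objective: alternative decomposition, same cost).


-- ===== PORT A =====
-- while loops with counters c,r become folds over List.range; board[r][c] is indexed with getD,
-- exact on Pre_ (non-empty board, every row at least as long as row 0), where all indices are in range.
def check_by_col (board : List (List String)) : Bool :=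
  (List.range (board.headD []).length).foldl (fun winner c =>
    ((List.range board.length).foldl (fun (st : Nat × Bool) r =>
        let count := if (board.getD r []).getD c "" == "x" then st.1 + 1 else st.1
        let winner := if 3 ≤ count then true else st.2
        (count, winner)) (0, winner)).2) false

-- ===== PORT B =====
def check_by_col_alt (board : List (List String)) : Bool :=
  ((List.range board.length).foldl (fun counts r =>
      (List.range (board.headD []).length).map (fun c =>
        counts.getD c 0 + (if (board.getD r []).getD c "" == "x" then 1 else 0)))
    (List.replicate (board.headD []).length 0)).any (fun x => decide (3 ≤ x))

-- ===== PRECONDITION & SPEC =====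
-- Pre_ excludes exactly the inputs where the Python A raises IndexError: the empty board
-- (board[0]) and ragged boards with some row shorter than row 0 (board[r][c]).
def Pre_check_by_col (board : List (List String)) : Prop :=
  board ≠ [] ∧ ∀ row ∈ board, (board.headD []).length ≤ row.length
instance (board : List (List String)) : Decidable (Pre_check_by_col board) := by unfold Pre_check_by_col; infer_instance
def pvWitness_check_by_col : List (List String) := [["x", "o"], ["x", "o"], ["x", "o"]]

def Spec_check_by_col (board : List (List String)) (out : Bool) : Prop := out = check_by_col_alt board
instance (board : List (List String)) (out : Bool) : Decidable (Spec_check_by_col board out) := by unfold Spec_check_by_col; infer_instance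

-- ===== CLAIM (what is proved, stated in full; the proofs are below) =====
def Claim_equal_check_by_col : Prop := ∀ (board : List (List String)), Dom_check_by_col board → Pre_check_by_col board → Spec_check_by_col board (check_by_col board)

-- ===== LEMMAS AND PROOFS =====

-- number of 'x' cells in column c
def pvTally (rows : List (List String)) (c : Nat) : Nat :=
  (rows.map (fun row => if row.getD c "" == "x" then 1 else 0)).sum

-- a fold over range(l.length) reading l.getD is a fold over l
theorem pv_foldl_range_getD {α β : Type} (l : List α) (d : α) (f : β → α → β) (init : β) :
    (List.range l.length).foldl (fun s r => f s (l.getD r d)) init = l.foldl f init := by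
  induction l generalizing init with
  | nil => simp
  | cons a t ih =>
      simp only [List.length_cons, List.range_succ_eq_map, List.foldl_cons, List.foldl_map]
      simpa using ih (f init a)

-- winner update: once the running count reaches 3 the flag is set; equivalent to comparing the final tally
theorem pv_bool (a b : Nat) (w e : Bool) (hab : a ≤ b) (he : e = false → a = b) :
    ((if 3 ≤ a then true else w) || (e && decide (3 ≤ b))) = (w || decide (3 ≤ b)) := by
  by_cases h3 : 3 ≤ a
  · have hb3 : 3 ≤ b := le_trans h3 hab
    simp [h3, hb3]
  · by_cases he' : e = true
    · simp [h3, he']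
    · have hb := he (by simpa using he')
      subst hb
      simp [h3]

-- A's inner row loop: final count is the column tally; winner is set iff the tally reaches 3
theorem pv_inner (c : Nat) (rows : List (List String)) (count : Nat) (w : Bool) :
    rows.foldl (fun (st : Nat × Bool) row =>
        let count := if row.getD c "" == "x" then st.1 + 1 else st.1
        let winner := if 3 ≤ count then true else st.2
        (count, winner)) (count, w)
      = (count + pvTally rows c,
         w || (!rows.isEmpty && decide (3 ≤ count + pvTally rows c))) := by
  induction rows generalizing count w with
  | nil => simp [pvTally]
  | cons row rest ih =>
      by_cases h : (row.getD c "" == "x") = true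
      · have ht : pvTally (row :: rest) c = 1 + pvTally rest c := by
          simp only [pvTally, List.map_cons, List.sum_cons, h, if_true]
        simp only [List.foldl_cons, h, if_true]
        rw [ih]
        simp only [Prod.mk.injEq, ht, List.isEmpty_cons, Bool.not_false, Bool.true_and]
        have harith : count + (1 + pvTally rest c) = count + 1 + pvTally rest c := by omega
        rw [harith]
        refine ⟨rfl, ?_⟩
        exact pv_bool (count + 1) (count + 1 + pvTally rest c) w (!rest.isEmpty)
          (by omega) (fun hee => by
            rcases rest with _ | ⟨r2, rest2⟩
            · simp [pvTally]
            · simp at hee)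
      · have hf : (row.getD c "" == "x") = false := by simpa using h
        have ht : pvTally (row :: rest) c = pvTally rest c := by
          simp only [pvTally, List.map_cons, List.sum_cons, hf, Bool.false_eq_true, if_false]
          omega
        simp only [List.foldl_cons, hf, Bool.false_eq_true, if_false]
        rw [ih]
        simp only [Prod.mk.injEq, ht, List.isEmpty_cons, Bool.not_false, Bool.true_and]
        refine ⟨trivial, ?_⟩
        exact pv_bool count (count + pvTally rest c) w (!rest.isEmpty)
          (by omega) (fun hee => by
            rcases rest with _ | ⟨r2, rest2⟩
            · simp [pvTally]
            · simp at hee)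

-- A's outer column loop, accumulated with ||
theorem pv_outer (board : List (List String)) (hb : board.isEmpty = false)
    (cols : List Nat) (w : Bool) :
    cols.foldl (fun winner c =>
      ((List.range board.length).foldl (fun (st : Nat × Bool) r =>
        let count := if (board.getD r []).getD c "" == "x" then st.1 + 1 else st.1
        let winner := if 3 ≤ count then true else st.2
        (count, winner)) (0, winner)).2) w
    = (w || cols.any (fun c => decide (3 ≤ pvTally board c))) := by
  induction cols generalizing w with
  | nil => simp
  | cons a t ih =>
      simp only [List.foldl_cons, List.any_cons]
      rw [pv_foldl_range_getD board [] (fun (st : Nat × Bool) row =>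
        let count := if row.getD a "" == "x" then st.1 + 1 else st.1
        let winner := if 3 ≤ count then true else st.2
        (count, winner)) (0, w), pv_inner, hb]
      simp only [Bool.not_false, Bool.true_and, Nat.zero_add]
      rw [ih]
      simp [Bool.or_assoc]

-- A computes: some column tally reaches 3 (given a non-empty board)
theorem pv_A (board : List (List String)) (hne : board ≠ []) :
    check_by_col board
      = (List.range (board.headD []).length).any (fun c => decide (3 ≤ pvTally board c)) := by
  have hb : board.isEmpty = false := by
    rcases board with _ | ⟨r, rs⟩
    · exact absurd rfl hne
    · rfl
  unfold check_by_col
  rw [pv_outer board hb]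
  simp

-- B's row pass: the tally list it maintains is pointwise init + column tally
theorem pv_B_inv (n : Nat) (rows : List (List String)) (counts : List Nat)
    (hlen : counts.length = n) :
    rows.foldl (fun counts row =>
        (List.range n).map (fun c =>
          counts.getD c 0 + (if row.getD c "" == "x" then 1 else 0))) counts
      = (List.range n).map (fun c => counts.getD c 0 + pvTally rows c) := by
  induction rows generalizing counts with
  | nil =>
      simp only [List.foldl_nil, pvTally, List.map_nil, List.sum_nil]
      apply List.ext_getElem (by simp [hlen])
      intro i h1 h2
      simp only [List.getElem_map, List.getElem_range]
      rw [List.getD_eq_getElem _ _ (by simp_all)]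
      simp
  | cons row rest ih =>
      simp only [List.foldl_cons]
      rw [ih _ (by simp)]
      apply List.map_congr_left
      intro c hc
      have hcn : c < n := by simpa using hc
      rw [List.getD_eq_getElem _ _ (by simp [hcn])]
      simp [pvTally]
      omega

theorem pv_B (board : List (List String)) :
    check_by_col_alt board
      = (List.range (board.headD []).length).any (fun c => decide (3 ≤ pvTally board c)) := by
  unfold check_by_col_alt
  rw [pv_foldl_range_getD board [] (fun counts row =>
        (List.range (board.headD []).length).map (fun c =>
          counts.getD c 0 + (if row.getD c "" == "x" then 1 else 0)))
      (List.replicate (board.headD []).length 0)]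
  rw [pv_B_inv _ _ _ (by simp)]
  rw [List.any_map]
  simp [Function.comp_def]

-- ===== VERDICT (by name: the statement is the Claim_ definition above) =====
theorem check_by_col_spec : Claim_equal_check_by_col := by
  intro board _ hpre
  unfold Spec_check_by_col
  rw [pv_A board hpre.1, pv_B]
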